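-- pv_equiv track=rewrite | github.com/mariapan0330/CodeWars-LeetCode-Problems | attendance.py | attendance
-- ===== SOURCE A (Python) =====
-- def attendance(record):
--     a_count = 0
--     l_count = 0
--     for c in record:
--         if c == 'A':
--             a_count += 1
--             l_count = 0
--             if a_count > 1:
--                 return False
--         elif c == 'L':
--             l_count += 1
--             if l_count >= 3:
--                 return False
--         else:
--             l_count = 0
--     return True
-- ===== SOURCE B (Python) =====
-- def attendance(record):
--     return record.count('A') < 2 and 'LLL' not in record
-- ===== Notes on version B (the rewrite author's own statement) =====
-- stated objective: idiomatic
-- what changed: Replaces the stateful single-pass loop with counters and early returns by the closed-form idiomatic check record.count('A') < 2 and 'LLL' not in record (a character count plus a substring search, no explicit loop state).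
import Mathlib
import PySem

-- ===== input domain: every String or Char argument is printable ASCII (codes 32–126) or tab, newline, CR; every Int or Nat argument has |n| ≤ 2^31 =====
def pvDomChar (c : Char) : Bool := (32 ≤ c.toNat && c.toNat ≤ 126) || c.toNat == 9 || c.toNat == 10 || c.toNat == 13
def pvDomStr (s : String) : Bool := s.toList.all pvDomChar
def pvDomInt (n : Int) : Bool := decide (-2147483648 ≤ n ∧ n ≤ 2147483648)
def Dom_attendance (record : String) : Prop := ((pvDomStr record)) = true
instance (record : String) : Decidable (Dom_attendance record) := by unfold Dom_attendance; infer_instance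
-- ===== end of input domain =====

-- B replaces A's stateful counter loop by the closed-form check count('A') < 2 and no "LLL" substring (idiomatic, same cost).

-- ===== PORT A =====
-- the 'for c in record' loop with its two counters and early returns, step for step
def attendanceLoop : List Char → Int → Int → Bool
  | [], _, _ => true
  | c :: rest, aCount, lCount =>
    if c == 'A' then
      if aCount + 1 > 1 then false
      else attendanceLoop rest (aCount + 1) 0
    else if c == 'L' then
      if lCount + 1 ≥ 3 then false
      else attendanceLoop rest aCount (lCount + 1)
    else attendanceLoop rest aCount 0

def attendance (record : String) : Bool :=
  attendanceLoop record.toList 0 0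

-- ===== PORT B =====
def attendance_alt (record : String) : Bool :=
  decide (PySem.Str.count record "A" < 2) && !(PySem.Str.isIn "LLL" record)

-- ===== PRECONDITION & SPEC =====
def Spec_attendance (record : String) (out : Bool) : Prop := out = attendance_alt record
instance (record : String) (out : Bool) : Decidable (Spec_attendance record out) := by unfold Spec_attendance; infer_instance

-- ===== CLAIM (what is proved, stated in full; the proofs are below) =====
def Claim_equal_attendance : Prop := ∀ (record : String), Dom_attendance record → Spec_attendance record (attendance record)

-- ===== LEMMAS AND PROOFS =====

-- single-character case of Python's substring str.count: it is List.count
theorem countGo_singleton (c : Char) (s : List Char) : ∀ (fuel acc : Nat), s.length ≤ fuel →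
    PySem.Chars.count.go [c] fuel s acc = acc + s.count c := by
  induction s with
  | nil =>
    intro fuel acc _
    cases fuel <;> simp [PySem.Chars.count.go]
  | cons h t ih =>
    intro fuel acc hf
    cases fuel with
    | zero => simp at hf
    | succ n =>
      by_cases hc : h = c
      · subst hc
        simp [PySem.Chars.count.go, List.isPrefixOf, ih n (acc + 1) (by simpa using hf)]
        omega
      · have : ¬ [c].isPrefixOf (h :: t) = true := by
          simp [List.isPrefixOf_iff_prefix, List.cons_prefix_cons]
          intro hch; exact hc hch.symm
        simp only [PySem.Chars.count.go, this]
        rw [ih n acc (by simpa using hf)]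
        simp [hc]

theorem count_singleton (c : Char) (s : List Char) : PySem.Chars.count s [c] = s.count c := by
  simp [PySem.Chars.count, countGo_singleton c s s.length 0 le_rfl]

-- a shorter run of the same character is also a prefix
theorem replicate_prefix_mono {x : Char} {k m : Nat} {ys : List Char} (hkm : k ≤ m)
    (h : List.replicate m x <+: ys) : List.replicate k x <+: ys := by
  refine List.IsPrefix.trans ?_ h
  exact ⟨List.replicate (m - k) x, by rw [← List.replicate_add, Nat.add_sub_cancel' hkm]⟩

-- loop invariant: with absence count a and current L-streak l, A's loop succeeds iff
-- a + (#'A' in the rest) stays ≤ 1 and no run of 3 'L' (counting the carried streak) occurs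
theorem attendanceLoop_eq (cs : List Char) : ∀ (a l : Int), 0 ≤ a → a ≤ 1 → 0 ≤ l → l ≤ 2 →
    attendanceLoop cs a l =
      (decide ((cs.count 'A' : Int) + a ≤ 1) &&
       !(decide (List.replicate ((3:Int) - l).toNat 'L' <+: cs ∨ ['L', 'L', 'L'] <:+: cs))) := by
  induction cs with
  | nil =>
    intro a l ha0 ha1 hl0 hl2
    have h1 : ¬ (List.replicate ((3:Int) - l).toNat 'L' <+: ([] : List Char)) := by
      simp [List.prefix_nil, List.replicate_eq_nil_iff]
      omega
    have h2 : ¬ (['L', 'L', 'L'] <:+: ([] : List Char)) := by simp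
    simp [attendanceLoop, h1, h2, ha1]
  | cons c rest ih =>
    intro a l ha0 ha1 hl0 hl2
    by_cases hA : c = 'A'
    · subst hA
      by_cases h2 : a + 1 > 1
      · have ha : a = 1 := by omega
        subst ha
        simp [attendanceLoop]
      · have ha : a = 0 := by omega
        subst ha
        simp only [attendanceLoop, if_pos (by simp : ('A' == 'A') = true), zero_add]
        rw [ih 1 0 (by omega) (by omega) (by omega) (by omega)]
        have hrep : ¬ (List.replicate ((3:Int) - l).toNat 'L' <+: ('A' :: rest)) := by
          have h31 : ((3:Int) - l).toNat = (((3:Int) - l).toNat - 1) + 1 := by omega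
          rw [h31, List.replicate_succ, List.cons_prefix_cons]
          rintro ⟨h, -⟩; exact absurd h (by decide)
        have hpre : ¬ (['L','L','L'] <+: ('A' :: rest)) := by
          rw [List.cons_prefix_cons]; rintro ⟨h, -⟩; exact absurd h (by decide)
        have hbad : (List.replicate ((3:Int) - l).toNat 'L' <+: ('A' :: rest) ∨
            ['L','L','L'] <:+: ('A' :: rest)) ↔
            (List.replicate ((3:Int) - (0:Int)).toNat 'L' <+: rest ∨ ['L','L','L'] <:+: rest) := by
          rw [List.infix_cons_iff (l₁ := ['L','L','L'])]
          constructor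
          · rintro (h | h | h)
            · exact absurd h hrep
            · exact absurd h hpre
            · right; exact h
          · rintro (h | h)
            · right; right
              exact List.IsPrefix.isInfix (by simpa using h)
            · right; right; exact h
        have hb : (decide (List.replicate ((3:Int) - l).toNat 'L' <+: ('A' :: rest) ∨
              ['L','L','L'] <:+: ('A' :: rest)) : Bool)
            = decide (List.replicate ((3:Int) - (0:Int)).toNat 'L' <+: rest ∨
              ['L','L','L'] <:+: rest) := decide_eq_decide.mpr hbad
        have hc : (decide (((('A' :: rest).count 'A' : Int) + 0 ≤ 1)) : Bool)
            = decide (((rest.count 'A' : Int) + 1 ≤ 1)) := by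
          apply decide_eq_decide.mpr
          simp
        rw [hb, hc]
        simp
    · by_cases hL : c = 'L'
      · subst hL
        by_cases h3 : l + 1 ≥ 3
        · have hl : l = 2 := by omega
          subst hl
          simp [attendanceLoop]
        · simp only [attendanceLoop, if_neg (by simp : ¬ ('L' == 'A') = true),
            if_pos (by simp : ('L' == 'L') = true), if_neg h3]
          rw [ih a (l + 1) ha0 ha1 (by omega) (by omega)]
          have hbad : (List.replicate ((3:Int) - l).toNat 'L' <+: ('L' :: rest) ∨
              ['L','L','L'] <:+: ('L' :: rest)) ↔
              (List.replicate ((3:Int) - (l + 1)).toNat 'L' <+: rest ∨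
               ['L','L','L'] <:+: rest) := by
            have hsucc : ((3:Int) - l).toNat = ((3:Int) - (l + 1)).toNat + 1 := by omega
            rw [hsucc, List.replicate_succ, List.cons_prefix_cons,
              List.infix_cons_iff (l₁ := ['L','L','L'])]
            have hLLL : (['L','L','L'] <+: ('L' :: rest)) ↔ (['L','L'] <+: rest) := by
              rw [List.cons_prefix_cons]; simp
            constructor
            · rintro (⟨-, h⟩ | h | h)
              · left; exact h
              · left
                rw [hLLL] at h
                exact replicate_prefix_mono (k := ((3:Int) - (l + 1)).toNat) (m := 2)
                  (x := 'L') (by omega) (by simpa using h)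
              · right; exact h
            · rintro (h | h)
              · left; exact ⟨rfl, h⟩
              · right; right; exact h
          have hb : (decide (List.replicate ((3:Int) - l).toNat 'L' <+: ('L' :: rest) ∨
                ['L','L','L'] <:+: ('L' :: rest)) : Bool)
              = decide (List.replicate ((3:Int) - (l + 1)).toNat 'L' <+: rest ∨
                ['L','L','L'] <:+: rest) := decide_eq_decide.mpr hbad
          have hcc : ('L' :: rest).count 'A' = rest.count 'A' := by
            simp
          rw [hb, hcc]
      · simp only [attendanceLoop, if_neg (by simp [hA] : ¬ (c == 'A') = true),
          if_neg (by simp [hL] : ¬ (c == 'L') = true)]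
        rw [ih a 0 ha0 ha1 (by omega) (by omega)]
        have hrep : ¬ (List.replicate ((3:Int) - l).toNat 'L' <+: (c :: rest)) := by
          have h31 : ((3:Int) - l).toNat = (((3:Int) - l).toNat - 1) + 1 := by omega
          rw [h31, List.replicate_succ, List.cons_prefix_cons]
          rintro ⟨h, -⟩; exact hL h.symm
        have hpre : ¬ (['L','L','L'] <+: (c :: rest)) := by
          rw [List.cons_prefix_cons]; rintro ⟨h, -⟩; exact hL h.symm
        have hbad : (List.replicate ((3:Int) - l).toNat 'L' <+: (c :: rest) ∨
            ['L','L','L'] <:+: (c :: rest)) ↔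
            (List.replicate ((3:Int) - (0:Int)).toNat 'L' <+: rest ∨ ['L','L','L'] <:+: rest) := by
          rw [List.infix_cons_iff (l₁ := ['L','L','L'])]
          constructor
          · rintro (h | h | h)
            · exact absurd h hrep
            · exact absurd h hpre
            · right; exact h
          · rintro (h | h)
            · right; right
              exact List.IsPrefix.isInfix (by simpa using h)
            · right; right; exact h
        have hb : (decide (List.replicate ((3:Int) - l).toNat 'L' <+: (c :: rest) ∨
              ['L','L','L'] <:+: (c :: rest)) : Bool)
            = decide (List.replicate ((3:Int) - (0:Int)).toNat 'L' <+: rest ∨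
              ['L','L','L'] <:+: rest) := decide_eq_decide.mpr hbad
        have hcc : (c :: rest).count 'A' = rest.count 'A' := by
          simp [hA]
        rw [hb, hcc]

-- ===== VERDICT (by name: the statement is the Claim_ definition above) =====
theorem attendance_spec : Claim_equal_attendance := by
  intro record _
  unfold Spec_attendance attendance attendance_alt
  rw [attendanceLoop_eq record.toList 0 0 (by omega) (by omega) (by omega) (by omega)]
  have hcnt : PySem.Str.count record "A" = record.toList.count 'A' := by
    simpa using count_singleton 'A' record.toList
  have hin : PySem.Str.isIn "LLL" record = decide (['L','L','L'] <:+: record.toList) := by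
    by_cases h : ['L','L','L'] <:+: record.toList
    · rw [decide_eq_true h]
      exact (PySem.Str.isIn_iff_infix "LLL" record).2 (by simpa using h)
    · rw [decide_eq_false h]
      exact Bool.eq_false_iff.mpr
        (fun ht => h (by simpa using (PySem.Str.isIn_iff_infix "LLL" record).1 ht))
  have hbad : (List.replicate ((3:Int) - (0:Int)).toNat 'L' <+: record.toList ∨
      ['L','L','L'] <:+: record.toList) ↔ (['L','L','L'] <:+: record.toList) := by
    constructor
    · rintro (h | h)
      · exact List.IsPrefix.isInfix (by simpa using h)
      · exact h
    · intro h; right; exact h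
  have hb : (decide (List.replicate ((3:Int) - (0:Int)).toNat 'L' <+: record.toList ∨
        ['L','L','L'] <:+: record.toList) : Bool)
      = decide (['L','L','L'] <:+: record.toList) := decide_eq_decide.mpr hbad
  have hc : (decide (((record.toList.count 'A' : Int) + 0 ≤ 1)) : Bool)
      = decide (record.toList.count 'A' < 2) := by
    apply decide_eq_decide.mpr
    omega
  rw [hb, hc, hcnt, hin]
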